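-- pv_equiv track=rewrite | github.com/jclements3/HarpHymnal | trefoil/reharm/render_midi.py | _diatonic_neighbor
-- ===== SOURCE A (Python) =====
-- _PITCH_CLASS = {"C": 0, "D": 2, "E": 4, "F": 5, "G": 7, "A": 9, "B": 11}
--
-- _MAJOR_STEPS = [0, 2, 4, 5, 7, 9, 11]
--
-- _MINOR_STEPS = [0, 2, 3, 5, 7, 8, 10]
--
-- def _parse_key_root(key_root: str) -> int:
--     s = (key_root or "C").strip()
--     if not s:
--         return 0
--     base = _PITCH_CLASS[s[0].upper()]
--     for ch in s[1:]:
--         if ch == "#":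
--             base = (base + 1) % 12
--         elif ch in ("b", "-"):
--             base = (base - 1) % 12
--     return base
--
-- def _scale_steps(mode: str) -> list[int]:
--     return _MINOR_STEPS if (mode or "").startswith("m") or mode == "minor" else _MAJOR_STEPS
--
-- def _diatonic_neighbor(midi: int, key_root: str, mode: str, direction: int) -> int:
--     tonic_pc = _parse_key_root(key_root)
--     steps = _scale_steps(mode)
--     pc_above = (midi - tonic_pc) % 12
--     if pc_above in steps:
--         idx = steps.index(pc_above)
--     else:
--         # nearest scale step below
--         below = [s for s in steps if s <= pc_above]
--         idx = steps.index(below[-1]) if below else 0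
--     new_idx = idx + direction
--     octave_shift = 0
--     if new_idx < 0:
--         new_idx += 7
--         octave_shift = -1
--     elif new_idx >= 7:
--         new_idx -= 7
--         octave_shift = 1
--     anchor = midi - pc_above
--     return anchor + 12 * octave_shift + steps[new_idx]
-- ===== SOURCE B (Python) =====
-- _PITCH_CLASS = {"C": 0, "D": 2, "E": 4, "F": 5, "G": 7, "A": 9, "B": 11}
--
-- _MAJOR_STEPS = [0, 2, 4, 5, 7, 9, 11]
--
-- _MINOR_STEPS = [0, 2, 3, 5, 7, 8, 10]
--
-- def _parse_key_root(key_root: str) -> int: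
--     s = (key_root or "C").strip()
--     if not s:
--         return 0
--     base = _PITCH_CLASS[s[0].upper()]
--     for ch in s[1:]:
--         if ch == "#":
--             base = (base + 1) % 12
--         elif ch in ("b", "-"):
--             base = (base - 1) % 12
--     return base
--
-- def _scale_steps(mode: str) -> list[int]:
--     return _MINOR_STEPS if (mode or "").startswith("m") or mode == "minor" else _MAJOR_STEPS
--
-- def _diatonic_neighbor(midi: int, key_root: str, mode: str, direction: int) -> int:
--     tonic = _parse_key_root(key_root)
--     steps = _scale_steps(mode)
--     # inverse table: pitch class -> floored scale degree, filled once
--     degmap = [0] * 12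
--     for d, s in enumerate(steps):
--         for pc in range(s, 12):
--             degmap[pc] = d
--     # absolute degree coordinates: semitones -> degrees, shift, degrees -> semitones
--     octave, pc = divmod(midi - tonic, 12)
--     degree = 7 * octave + degmap[pc] + direction
--     octave2, d2 = divmod(degree, 7)
--     return tonic + 12 * octave2 + steps[d2]
-- ===== Notes on version B (the rewrite author's own statement) =====
-- stated objective: alternative
-- what changed: B precomputes a 12-entry pitch-class-to-scale-degree inverse table and works in absolute degree coordinates (semitones -> degrees via divmod by 12, shift, degrees -> semitones via divmod by 7), replacing A's membership test + linear .index + filter-for-largest-below fallback and its one-shot if/elif +-7 octave wrap.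
-- intended difference: When the diatonic index plus direction lies in [-14,-8], A's single +7 wrap leaves a negative list index, so Python's negative-index wraparound makes A return the right scale step but one octave too high (B's value + 12); B's degree arithmetic returns the intended neighbor two octaves down. — e.g. on _diatonic_neighbor(60, "C", "", -8): A returns 59, B returns 47
import Mathlib
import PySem

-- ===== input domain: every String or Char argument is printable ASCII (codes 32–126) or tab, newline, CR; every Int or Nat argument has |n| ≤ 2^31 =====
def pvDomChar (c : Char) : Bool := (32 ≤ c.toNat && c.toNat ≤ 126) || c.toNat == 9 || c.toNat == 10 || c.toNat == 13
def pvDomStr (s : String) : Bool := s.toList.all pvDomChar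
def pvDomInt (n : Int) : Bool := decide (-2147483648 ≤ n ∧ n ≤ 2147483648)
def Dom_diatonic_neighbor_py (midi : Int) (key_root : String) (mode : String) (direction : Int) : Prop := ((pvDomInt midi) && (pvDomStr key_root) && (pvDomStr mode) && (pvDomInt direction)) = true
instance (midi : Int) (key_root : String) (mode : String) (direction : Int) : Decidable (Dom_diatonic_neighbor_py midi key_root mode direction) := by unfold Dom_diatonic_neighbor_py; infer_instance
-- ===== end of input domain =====

-- B precomputes a 12-entry pitch-class→degree inverse table and works in absolute degree
-- coordinates with divmod, instead of A's membership/index scans and one-shot ±7 wrap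
-- (objective: alternative).

-- ===== SHARED MODULE HELPERS (unchanged between A and B, as in the Python module) =====
def pvPitchClass : PySem.Dict Char Int :=
  PySem.Dict.ofList [('C', 0), ('D', 2), ('E', 4), ('F', 5), ('G', 7), ('A', 9), ('B', 11)]

def pvMajorSteps : List Int := [0, 2, 4, 5, 7, 9, 11]

def pvMinorSteps : List Int := [0, 2, 3, 5, 7, 8, 10]

-- _parse_key_root; the KeyError on a first character outside CDEFGAB is excluded by Pre_
def parse_key_root (key_root : String) : Int :=
  let s := PySem.Chars.strip (if key_root.toList = [] then "C".toList else key_root.toList)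
  if s = [] then 0
  else
    let base := pvPitchClass.getD (PySem.Chars.upperChar (s.headD ' ')) 0
    (s.drop 1).foldl
      (fun b ch =>
        if ch = '#' then PySem.Int.mod (b + 1) 12
        else if ch = 'b' ∨ ch = '-' then PySem.Int.mod (b - 1) 12
        else b)
      base

-- _scale_steps
def scale_steps (mode : String) : List Int :=
  if PySem.Chars.startswith mode.toList ['m'] || mode = "minor" then pvMinorSteps else pvMajorSteps

-- ===== PORT A =====
def diatonic_neighbor_py (midi : Int) (key_root : String) (mode : String) (direction : Int) : Int :=
  let tonic_pc := parse_key_root key_root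
  let steps := scale_steps mode
  let pc_above := PySem.Int.mod (midi - tonic_pc) 12
  let idx : Int :=
    if steps.contains pc_above then ((PySem.List.index? steps pc_above).getD 0 : Nat)
    else
      -- nearest scale step below
      let below := steps.filter (fun s => decide (s ≤ pc_above))
      if below ≠ [] then
        ((PySem.List.index? steps ((PySem.List.pyGet? below (-1)).getD 0)).getD 0 : Nat)
      else 0
  let new_idx := idx + direction
  -- one-shot wrap: new_idx, octave_shift after the if/elif chain
  let w : Int × Int :=
    if new_idx < 0 then (new_idx + 7, -1)
    else if 7 ≤ new_idx then (new_idx - 7, 1)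
    else (new_idx, 0)
  let anchor := midi - pc_above
  -- steps[new_idx]: IndexError (none) is excluded by Pre_
  anchor + 12 * w.2 + (PySem.List.pyGet? steps w.1).getD 0

-- ===== PORT B =====
-- Source B's fill loop 'for d, s in enumerate(steps): for pc in range(s, 12): degmap[pc] = d';
-- 'degmap[pc] = d' is List.set at pc.toNat, exact here since pyRange s 12 1 yields pc with 0 ≤ s ≤ pc
def pvDegmap (steps : List Int) : List Int :=
  (PySem.List.enumerate steps 0).foldl
    (fun dm ds =>
      (PySem.List.pyRange ds.2 12 1).foldl (fun dm2 pc => dm2.set pc.toNat ds.1) dm)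
    (List.replicate 12 0)

def diatonic_neighbor_py_alt (midi : Int) (key_root : String) (mode : String) (direction : Int) : Int :=
  let tonic := parse_key_root key_root
  let steps := scale_steps mode
  let degmap := pvDegmap steps
  -- octave, pc = divmod(midi - tonic, 12)
  let octave := PySem.Int.floordiv (midi - tonic) 12
  let pc := PySem.Int.mod (midi - tonic) 12
  let degree := 7 * octave + (PySem.List.pyGet? degmap pc).getD 0 + direction
  -- octave2, d2 = divmod(degree, 7)
  tonic + 12 * PySem.Int.floordiv degree 7 + (PySem.List.pyGet? steps (PySem.Int.mod degree 7)).getD 0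

-- ===== PRECONDITION & SPEC =====
-- the diatonic index of midi in the key/scale: (number of scale steps ≤ pitch class) - 1, an Int in [0,6]
def pvIdxKey (midi : Int) (key_root : String) (mode : String) : Int :=
  (((scale_steps mode).filter
      (fun s => decide (s ≤ PySem.Int.mod (midi - parse_key_root key_root) 12))).length : Int) - 1

-- the stripped key names a pitch letter (else _PITCH_CLASS[...] raises KeyError) or is empty
def pvValidKey (key_root : String) : Bool :=
  let t := PySem.Chars.strip key_root.toList
  t.isEmpty || ['A', 'B', 'C', 'D', 'E', 'F', 'G'].contains (PySem.Chars.upperChar (t.headD ' '))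

-- Pre_ is exactly where A returns: a valid key letter, and the shifted index idx+direction in
-- [-14,13] (A's single wrap leaves an index in [-14,13]∖[0,6] to Python list indexing; outside
-- that range steps[new_idx] raises IndexError).
def Pre_diatonic_neighbor_py (midi : Int) (key_root : String) (mode : String) (direction : Int) : Prop :=
  pvValidKey key_root = true ∧
  -14 ≤ pvIdxKey midi key_root mode + direction ∧ pvIdxKey midi key_root mode + direction ≤ 13

instance (midi : Int) (key_root : String) (mode : String) (direction : Int) : Decidable (Pre_diatonic_neighbor_py midi key_root mode direction) := by unfold Pre_diatonic_neighbor_py; infer_instance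

def pvWitness_diatonic_neighbor_py : Int × String × String × Int := (60, "C", "", 1)

-- When idx+direction is in [-14,-8], A's single +7 wrap leaves a negative list index and Python's
-- negative-index wraparound returns the right pitch letter one octave too high (B's value + 12);
-- B's divmod returns the intended diatonic neighbor two octaves down.
def D_diatonic_neighbor_py (midi : Int) (key_root : String) (mode : String) (direction : Int) : Prop :=
  -14 ≤ pvIdxKey midi key_root mode + direction ∧ pvIdxKey midi key_root mode + direction ≤ -8

instance (midi : Int) (key_root : String) (mode : String) (direction : Int) : Decidable (D_diatonic_neighbor_py midi key_root mode direction) := by unfold D_diatonic_neighbor_py; infer_instance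

def Spec_diatonic_neighbor_py (midi : Int) (key_root : String) (mode : String) (direction : Int) (out : Int) : Prop := ¬ D_diatonic_neighbor_py midi key_root mode direction → out = diatonic_neighbor_py_alt midi key_root mode direction
instance (midi : Int) (key_root : String) (mode : String) (direction : Int) (out : Int) : Decidable (Spec_diatonic_neighbor_py midi key_root mode direction out) := by unfold Spec_diatonic_neighbor_py; infer_instance

def pvDiffWitness_diatonic_neighbor_py : Int × String × String × Int := (60, "C", "", -8)
def pvDiffWitnessOut_diatonic_neighbor_py : Int × Int := (59, 47)

-- ===== CLAIM (what is proved, stated in full; the proofs are below) =====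
def Claim_unchanged_diatonic_neighbor_py : Prop := ∀ (midi : Int) (key_root : String) (mode : String) (direction : Int), Dom_diatonic_neighbor_py midi key_root mode direction → Pre_diatonic_neighbor_py midi key_root mode direction → Spec_diatonic_neighbor_py midi key_root mode direction (diatonic_neighbor_py midi key_root mode direction)
def Claim_changed_diatonic_neighbor_py : Prop := Dom_diatonic_neighbor_py (pvDiffWitness_diatonic_neighbor_py.1) (pvDiffWitness_diatonic_neighbor_py.2.1) (pvDiffWitness_diatonic_neighbor_py.2.2.1) (pvDiffWitness_diatonic_neighbor_py.2.2.2) ∧ Pre_diatonic_neighbor_py (pvDiffWitness_diatonic_neighbor_py.1) (pvDiffWitness_diatonic_neighbor_py.2.1) (pvDiffWitness_diatonic_neighbor_py.2.2.1) (pvDiffWitness_diatonic_neighbor_py.2.2.2) ∧ D_diatonic_neighbor_py (pvDiffWitness_diatonic_neighbor_py.1) (pvDiffWitness_diatonic_neighbor_py.2.1) (pvDiffWitness_diatonic_neighbor_py.2.2.1) (pvDiffWitness_diatonic_neighbor_py.2.2.2) ∧ diatonic_neighbor_py (pvDiffWitness_diatonic_neighbor_py.1) (pvDiffWitness_diatonic_neighbor_py.2.1)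 (pvDiffWitness_diatonic_neighbor_py.2.2.1) (pvDiffWitness_diatonic_neighbor_py.2.2.2) = pvDiffWitnessOut_diatonic_neighbor_py.1 ∧ diatonic_neighbor_py_alt (pvDiffWitness_diatonic_neighbor_py.1) (pvDiffWitness_diatonic_neighbor_py.2.1) (pvDiffWitness_diatonic_neighbor_py.2.2.1) (pvDiffWitness_diatonic_neighbor_py.2.2.2) = pvDiffWitnessOut_diatonic_neighbor_py.2 ∧ pvDiffWitnessOut_diatonic_neighbor_py.1 ≠ pvDiffWitnessOut_diatonic_neighbor_py.2
def Claim_exact_diatonic_neighbor_py : Prop := ∀ (midi : Int) (key_root : String) (mode : String) (direction : Int), Dom_diatonic_neighbor_py midi key_root mode direction → Pre_diatonic_neighbor_py midi key_root mode direction → D_diatonic_neighbor_py midi key_root mode direction → diatonic_neighbor_py midi key_root mode direction ≠ diatonic_neighbor_py_alt midi key_root mode direction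

-- ===== LEMMAS AND PROOFS =====

lemma scale_steps_cases (mode : String) :
    scale_steps mode = pvMajorSteps ∨ scale_steps mode = pvMinorSteps := by
  unfold scale_steps; split_ifs <;> simp

-- A's idx (membership test + .index / filter fallback) equals B's degree-table lookup, equals the
-- count of scale steps ≤ pc minus 1, and lies in [0,6]; checked on both scale lists, all 12 pcs.
lemma idx_core (steps : List Int) (hs : steps = pvMajorSteps ∨ steps = pvMinorSteps)
    (pc : Int) (h0 : 0 ≤ pc) (h1 : pc < 12) :
    ((if steps.contains pc then (((PySem.List.index? steps pc).getD 0 : Nat) : Int)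
      else
        if steps.filter (fun s => decide (s ≤ pc)) ≠ [] then
          (((PySem.List.index? steps
                ((PySem.List.pyGet? (steps.filter (fun s => decide (s ≤ pc))) (-1)).getD 0)).getD 0 : Nat) : Int)
        else 0)
       = (PySem.List.pyGet? (pvDegmap steps) pc).getD 0)
    ∧ (PySem.List.pyGet? (pvDegmap steps) pc).getD 0
        = ((steps.filter (fun s => decide (s ≤ pc))).length : Int) - 1
    ∧ 0 ≤ (PySem.List.pyGet? (pvDegmap steps) pc).getD 0
    ∧ (PySem.List.pyGet? (pvDegmap steps) pc).getD 0 ≤ 6 := by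
  rcases hs with rfl | rfl <;> interval_cases pc <;> decide

-- A's one-shot wrap equals B's divmod arithmetic while the shifted index k stays in [-7,13]
lemma wrap_eq (m pc k : Int) (steps : List Int) (hk1 : -7 ≤ k) (hk2 : k ≤ 13) :
    m - pc + 12 * (if k < 0 then (k + 7, (-1 : Int))
                   else if 7 ≤ k then (k - 7, (1 : Int)) else (k, (0 : Int))).2
      + (PySem.List.pyGet? steps
          (if k < 0 then (k + 7, (-1 : Int))
           else if 7 ≤ k then (k - 7, (1 : Int)) else (k, (0 : Int))).1).getD 0
    = m - pc + 12 * PySem.Int.floordiv k 7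
        + (PySem.List.pyGet? steps (PySem.Int.mod k 7)).getD 0 := by
  rw [PySem.Int.floordiv_eq_ediv_of_pos (by norm_num), PySem.Int.mod_eq_emod_of_pos (by norm_num)]
  split_ifs with h h'
  · have e1 : k % 7 = k + 7 := by omega
    have e2 : k / 7 = -1 := by omega
    rw [e1, e2]
  · have e1 : k % 7 = k - 7 := by omega
    have e2 : k / 7 = 1 := by omega
    rw [e1, e2]
  · have e1 : k % 7 = k := by omega
    have e2 : k / 7 = 0 := by omega
    rw [e1, e2]

-- inside D_ (k in [-14,-8]): A's negative index hits the same scale step one octave up, A = B + 12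
lemma wrap_diff (m pc k : Int) (steps : List Int)
    (hs : steps = pvMajorSteps ∨ steps = pvMinorSteps) (hk1 : -14 ≤ k) (hk2 : k ≤ -8) :
    m - pc + 12 * (if k < 0 then (k + 7, (-1 : Int))
                   else if 7 ≤ k then (k - 7, (1 : Int)) else (k, (0 : Int))).2
      + (PySem.List.pyGet? steps
          (if k < 0 then (k + 7, (-1 : Int))
           else if 7 ≤ k then (k - 7, (1 : Int)) else (k, (0 : Int))).1).getD 0
    = m - pc + 12 * PySem.Int.floordiv k 7
        + (PySem.List.pyGet? steps (PySem.Int.mod k 7)).getD 0 + 12 := by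
  rcases hs with rfl | rfl <;> interval_cases k <;>
    simp [pvMajorSteps, pvMinorSteps, PySem.List.pyGet?, PySem.List.pyIdx?, PySem.Int.floordiv, PySem.Int.mod] <;> omega

-- shifting the degree by whole octaves commutes with divmod by 7
lemma deg_shift (q a b : Int) :
    PySem.Int.floordiv (7 * q + a + b) 7 = q + PySem.Int.floordiv (a + b) 7
    ∧ PySem.Int.mod (7 * q + a + b) 7 = PySem.Int.mod (a + b) 7 := by
  rw [PySem.Int.floordiv_eq_ediv_of_pos (by norm_num), PySem.Int.mod_eq_emod_of_pos (by norm_num),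
    PySem.Int.floordiv_eq_ediv_of_pos (by norm_num), PySem.Int.mod_eq_emod_of_pos (by norm_num)]
  constructor <;> omega

-- B's value at (midi,key,mode,dir) equals (midi - pc) + 12*(k//7) + steps[k%7] with k = idx + dir
lemma alt_eq (midi : Int) (key_root : String) (mode : String) (direction : Int) :
    diatonic_neighbor_py_alt midi key_root mode direction
    = midi - PySem.Int.mod (midi - parse_key_root key_root) 12
      + 12 * PySem.Int.floordiv
          ((PySem.List.pyGet? (pvDegmap (scale_steps mode))
              (PySem.Int.mod (midi - parse_key_root key_root) 12)).getD 0 + direction) 7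
      + (PySem.List.pyGet? (scale_steps mode)
          (PySem.Int.mod
            ((PySem.List.pyGet? (pvDegmap (scale_steps mode))
                (PySem.Int.mod (midi - parse_key_root key_root) 12)).getD 0 + direction) 7)).getD 0 := by
  unfold diatonic_neighbor_py_alt
  obtain ⟨hf, hm⟩ := deg_shift (PySem.Int.floordiv (midi - parse_key_root key_root) 12)
    ((PySem.List.pyGet? (pvDegmap (scale_steps mode))
        (PySem.Int.mod (midi - parse_key_root key_root) 12)).getD 0) direction
  simp only [hf, hm]
  have hq := PySem.Int.floordiv_mul_add_mod (midi - parse_key_root key_root) 12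
  linarith [hq]

-- ===== VERDICT (by name: the statement is the Claim_ definition above) =====
theorem diatonic_neighbor_py_spec : Claim_unchanged_diatonic_neighbor_py := by
  intro midi key_root mode direction _ hpre hnd
  obtain ⟨_, hlo, hhi⟩ := hpre
  unfold D_diatonic_neighbor_py at hnd
  unfold pvIdxKey at hlo hhi hnd
  rw [alt_eq]
  unfold diatonic_neighbor_py
  have h0 : 0 ≤ PySem.Int.mod (midi - parse_key_root key_root) 12 :=
    PySem.Int.mod_nonneg _ (by norm_num)
  have h1 : PySem.Int.mod (midi - parse_key_root key_root) 12 < 12 :=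
    PySem.Int.mod_lt _ (by norm_num)
  obtain ⟨hA, hCount, hge, hle⟩ := idx_core (scale_steps mode) (scale_steps_cases mode) _ h0 h1
  simp only [hA, hCount] at *
  exact wrap_eq midi _ _ (scale_steps mode) (by omega) (by omega)

theorem diatonic_neighbor_py_changed : Claim_changed_diatonic_neighbor_py := by
  unfold Claim_changed_diatonic_neighbor_py; decide

theorem diatonic_neighbor_py_tight : Claim_exact_diatonic_neighbor_py := by
  intro midi key_root mode direction _ hpre hd
  obtain ⟨_, hlo, hhi⟩ := hpre
  unfold D_diatonic_neighbor_py at hd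
  unfold pvIdxKey at hlo hhi hd
  rw [alt_eq]
  unfold diatonic_neighbor_py
  have h0 : 0 ≤ PySem.Int.mod (midi - parse_key_root key_root) 12 :=
    PySem.Int.mod_nonneg _ (by norm_num)
  have h1 : PySem.Int.mod (midi - parse_key_root key_root) 12 < 12 :=
    PySem.Int.mod_lt _ (by norm_num)
  obtain ⟨hA, hCount, hge, hle⟩ := idx_core (scale_steps mode) (scale_steps_cases mode) _ h0 h1
  simp only [hA, hCount] at *
  have hw := wrap_diff midi (PySem.Int.mod (midi - parse_key_root key_root) 12) _
    (scale_steps mode) (scale_steps_cases mode) (show -14 ≤ _ by omega) (show _ ≤ -8 by omega)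
  simp only [hw]
  omega
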